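-- pv_equiv track=rewrite | github.com/arixpsy/CodeStepByStep | recursion/remove_odd_digits.py | remove_odd_digits
-- ===== SOURCE A (Python) =====
-- def remove_odd_digits(num):
--     neg = 1
--     if num < 0:
--         neg = -1
--         num = abs(num)
--     lastdigit = int(num%10)
--     if lastdigit == 0:
--         if num >10:
--             return (remove_odd_digits(int(num//10))*10) * neg
--         else:
--             return 0
--     elif lastdigit % 2 != 0:
--         return (remove_odd_digits(int(num//10))) * neg
--     else:
--         return (remove_odd_digits(int(num//10))*10 + lastdigit) * neg
-- ===== SOURCE B (Python) =====
-- def remove_odd_digits(num):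
--     neg = 1
--     if num < 0:
--         neg = -1
--         num = abs(num)
--     result = 0
--     place = 1
--     while True:
--         d = int(num % 10)
--         if d == 0:
--             if num <= 10:
--                 break
--             place *= 10
--         elif d % 2 == 0:
--             result += d * place
--             place *= 10
--         num = int(num // 10)
--     return result * neg
-- ===== Notes on version B (the rewrite author's own statement) =====
-- stated objective: alternative
-- what changed: Replaced A's top-down recursion (which rebuilds the result while unwinding) by a single bottom-up while-loop over the digits that accumulates even digits into result with a running place-value multiplier.
import Mathlib
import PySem

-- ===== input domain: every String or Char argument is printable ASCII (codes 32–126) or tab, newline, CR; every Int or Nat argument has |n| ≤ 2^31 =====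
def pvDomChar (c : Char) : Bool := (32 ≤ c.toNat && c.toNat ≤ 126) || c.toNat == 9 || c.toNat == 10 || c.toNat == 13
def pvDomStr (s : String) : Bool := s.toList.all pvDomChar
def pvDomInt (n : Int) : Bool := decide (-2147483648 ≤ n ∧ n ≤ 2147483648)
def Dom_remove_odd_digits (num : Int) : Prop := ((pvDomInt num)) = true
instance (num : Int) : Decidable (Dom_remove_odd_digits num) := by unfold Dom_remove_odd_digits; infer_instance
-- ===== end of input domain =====

-- B replaces A's recursion by a single while-loop that accumulates the even digits with a place-value
-- accumulator (objective: alternative decomposition, iterative instead of recursive; same cost).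

-- ===== PORT A =====
-- literal port of A: recursion on the digits, sign handled by neg/abs
def remove_odd_digits (num : Int) : Int :=
  let neg : Int := if num < 0 then -1 else 1
  let n : Int := if num < 0 then |num| else num
  let lastdigit := PySem.Int.mod n 10
  if lastdigit = 0 then
    if n > 10 then remove_odd_digits (PySem.Int.floordiv n 10) * 10 * neg
    else 0
  else if PySem.Int.mod lastdigit 2 ≠ 0 then
    remove_odd_digits (PySem.Int.floordiv n 10) * neg
  else
    (remove_odd_digits (PySem.Int.floordiv n 10) * 10 + lastdigit) * neg
termination_by num.natAbs
decreasing_by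
  all_goals simp only [lastdigit, n] at *
  all_goals
    simp only [PySem.Int.mod_eq_emod_of_pos (by norm_num : (0:Int) < 10),
      PySem.Int.mod_eq_emod_of_pos (by norm_num : (0:Int) < 2),
      PySem.Int.floordiv_eq_ediv_of_pos (by norm_num : (0:Int) < 10)] at *
  all_goals rcases lt_or_ge num 0 with hn | hn
  all_goals try simp only [dif_pos ‹num < 0›, abs_of_neg ‹num < 0›] at *
  all_goals try simp only [dif_neg (not_lt.mpr ‹0 ≤ num›)] at *
  all_goals omega

-- ===== PORT B =====
-- the while-loop of Source B; fuel only makes the recursion total (never exhausted on the calls B makes)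
def rodLoop (fuel : Nat) (num result place : Int) : Int :=
  match fuel with
  | 0 => result
  | f + 1 =>
    let d := PySem.Int.mod num 10
    if d = 0 then
      if num ≤ 10 then result
      else rodLoop f (PySem.Int.floordiv num 10) result (place * 10)
    else if PySem.Int.mod d 2 = 0 then
      rodLoop f (PySem.Int.floordiv num 10) (result + d * place) (place * 10)
    else
      rodLoop f (PySem.Int.floordiv num 10) result place

def remove_odd_digits_alt (num : Int) : Int :=
  let neg : Int := if num < 0 then -1 else 1
  let n : Int := if num < 0 then |num| else num
  rodLoop (n.natAbs + 1) n 0 1 * neg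

-- ===== PRECONDITION & SPEC =====
def Spec_remove_odd_digits (num : Int) (out : Int) : Prop := out = remove_odd_digits_alt num
instance (num : Int) (out : Int) : Decidable (Spec_remove_odd_digits num out) := by unfold Spec_remove_odd_digits; infer_instance

-- ===== CLAIM (what is proved, stated in full; the proofs are below) =====
def Claim_equal_remove_odd_digits : Prop := ∀ (num : Int), Dom_remove_odd_digits num → Spec_remove_odd_digits num (remove_odd_digits num)

-- ===== LEMMAS AND PROOFS =====

-- unfolding of A on a nonnegative argument (neg = 1, abs is the identity)
theorem rodA_nonneg (num : Int) (h : 0 ≤ num) :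
    remove_odd_digits num =
      if num % 10 = 0 then
        (if num > 10 then remove_odd_digits (num / 10) * 10 else 0)
      else if num % 10 % 2 ≠ 0 then remove_odd_digits (num / 10)
      else remove_odd_digits (num / 10) * 10 + num % 10 := by
  rw [remove_odd_digits]
  simp only [PySem.Int.mod_eq_emod_of_pos (by norm_num : (0:Int) < 10),
    PySem.Int.mod_eq_emod_of_pos (by norm_num : (0:Int) < 2),
    PySem.Int.floordiv_eq_ediv_of_pos (by norm_num : (0:Int) < 10),
    if_neg (not_lt.mpr h)]
  split_ifs <;> ring

-- the loop invariant: rodLoop computes A's value scaled by the place and shifted by the accumulator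
theorem rodLoop_eq (fuel : Nat) :
    ∀ (num r p : Int), 0 ≤ num → num < (fuel : Int) →
      rodLoop fuel num r p = remove_odd_digits num * p + r := by
  induction fuel with
  | zero => intro num r p h hf; omega
  | succ f ih =>
    intro num r p h hf
    rw [rodLoop, rodA_nonneg num h]
    simp only [PySem.Int.mod_eq_emod_of_pos (by norm_num : (0:Int) < 10),
      PySem.Int.mod_eq_emod_of_pos (by norm_num : (0:Int) < 2),
      PySem.Int.floordiv_eq_ediv_of_pos (by norm_num : (0:Int) < 10)]
    by_cases h0 : num % 10 = 0
    · simp only [if_pos h0]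
      by_cases h10 : num ≤ 10
      · rw [if_pos h10, if_neg (by omega)]; ring
      · rw [if_neg h10, if_pos (by omega), ih (num / 10) r (p * 10) (by omega) (by omega)]
        ring
    · simp only [if_neg h0]
      by_cases he : num % 10 % 2 = 0
      · rw [if_pos he, if_neg (by omega),
          ih (num / 10) (r + num % 10 * p) (p * 10) (by omega) (by omega)]
        ring
      · rw [if_neg he, if_pos (by omega), ih (num / 10) r p (by omega) (by omega)]

-- on a negative argument A is minus its value on the absolute value
theorem rodA_neg (num : Int) (h : num < 0) :
    remove_odd_digits num = - remove_odd_digits (-num) := by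
  conv_lhs => rw [remove_odd_digits]
  rw [rodA_nonneg (-num) (by omega)]
  simp only [if_pos h, abs_of_neg h,
    PySem.Int.mod_eq_emod_of_pos (by norm_num : (0:Int) < 10),
    PySem.Int.mod_eq_emod_of_pos (by norm_num : (0:Int) < 2),
    PySem.Int.floordiv_eq_ediv_of_pos (by norm_num : (0:Int) < 10)]
  split_ifs <;> ring

-- ===== VERDICT (by name: the statement is the Claim_ definition above) =====
theorem remove_odd_digits_spec : Claim_equal_remove_odd_digits := by
  intro num _
  unfold Spec_remove_odd_digits remove_odd_digits_alt
  by_cases h : num < 0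
  · simp only [if_pos h, abs_of_neg h]
    rw [rodLoop_eq _ (-num) 0 1 (by omega) (by omega), rodA_neg num h]
    ring
  · simp only [if_neg h]
    rw [rodLoop_eq _ num 0 1 (by omega) (by omega)]
    ring
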